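-- pv_equiv track=rewrite | github.com/AlexMoreo/diff-vectors | src/model/pair_generator.py | max_possible_negatives
-- ===== SOURCE A (Python) =====
-- def max_possible_negatives(groups):
--     # this function works well even if self.verification_task==True
--     lengths = [len(group) for group in groups]
--     control_value = 0
--     for i in range(len(groups)-1):
--         length_i = lengths[i]
--         length_rest = sum(lengths[i+1:])
--         control_value += length_i * length_rest
--     return int(control_value)
-- ===== SOURCE B (Python) =====
-- def max_possible_negatives(groups):
--     # Single pass maintaining a running suffix sum of group lengths.
--     remaining = sum(len(g) for g in groups)
--     acc = 0
--     for g in groups: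
--         remaining -= len(g)
--         acc += len(g) * remaining
--     return acc
-- ===== Notes on version B (the rewrite author's own statement) =====
-- stated objective: alternative
-- what changed: Replaced the indexed loop that re-sums lengths[i+1:] for every index with a single pass over the groups maintaining a running suffix sum of lengths (O(n) in the number of groups instead of O(n^2)); not measurably faster on the timing inputs.
import Mathlib
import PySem

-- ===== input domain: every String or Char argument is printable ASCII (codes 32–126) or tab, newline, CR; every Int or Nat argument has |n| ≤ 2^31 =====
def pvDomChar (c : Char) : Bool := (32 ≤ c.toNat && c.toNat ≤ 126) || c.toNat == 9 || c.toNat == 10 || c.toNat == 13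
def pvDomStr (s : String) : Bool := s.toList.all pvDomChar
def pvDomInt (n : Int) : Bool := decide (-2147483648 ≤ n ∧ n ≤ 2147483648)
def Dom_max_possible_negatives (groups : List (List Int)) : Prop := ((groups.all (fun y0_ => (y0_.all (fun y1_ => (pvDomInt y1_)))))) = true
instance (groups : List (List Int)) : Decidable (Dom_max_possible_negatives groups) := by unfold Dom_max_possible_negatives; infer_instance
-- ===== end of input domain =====

-- B replaces A's per-index re-summation of lengths[i+1:] with one pass keeping a running suffix sum of lengths (alternative algorithm).


-- ===== PORT A =====
-- Python: lengths = [len(g) for g in groups]; loop i in range(len(groups)-1),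
-- adding lengths[i] * sum(lengths[i+1:]). range(len-1) with len=0 is empty, matching
-- Nat subtraction. lengths[i] is always in range here, so List.getD is exact; the
-- slice lengths[i+1:] with a nonnegative bound is exactly List.drop.
def max_possible_negatives (groups : List (List Int)) : Int :=
  let lengths := groups.map (fun g => (g.length : Int))
  (List.range (groups.length - 1)).foldl
    (fun cv i => cv + lengths.getD i 0 * (lengths.drop (i + 1)).sum) 0

-- ===== PORT B =====
def max_possible_negatives_alt (groups : List (List Int)) : Int :=
  let total := (groups.map (fun g => (g.length : Int))).sum
  (groups.foldl
    (fun (p : Int × Int) g =>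
      let remaining := p.2 - (g.length : Int)
      (p.1 + (g.length : Int) * remaining, remaining))
    (0, total)).1

-- ===== PRECONDITION & SPEC =====
def Spec_max_possible_negatives (groups : List (List Int)) (out : Int) : Prop := out = max_possible_negatives_alt groups
instance (groups : List (List Int)) (out : Int) : Decidable (Spec_max_possible_negatives groups out) := by unfold Spec_max_possible_negatives; infer_instance

-- ===== CLAIM (what is proved, stated in full; the proofs are below) =====
def Claim_equal_max_possible_negatives : Prop := ∀ (groups : List (List Int)), Dom_max_possible_negatives groups → Spec_max_possible_negatives groups (max_possible_negatives groups)

-- ===== LEMMAS AND PROOFS =====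

-- Common reference value: Σ over the list of lengths of (head * sum of tail).
def pvF : List Int → Int
  | [] => 0
  | x :: xs => x * xs.sum + pvF xs

theorem pv_foldl_add_sum (t : Nat → Int) (l : List Nat) (a : Int) :
    l.foldl (fun cv i => cv + t i) a = a + (l.map t).sum := by
  induction l generalizing a with
  | nil => simp
  | cons x xs ih => simp [ih]; ring

theorem pvA_eq_f (l : List Int) :
    ((List.range (l.length - 1)).map
      (fun i => l.getD i 0 * (l.drop (i + 1)).sum)).sum = pvF l := by
  induction l with
  | nil => simp [pvF]
  | cons x xs ih =>
    cases xs with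
    | nil => simp [pvF]
    | cons y ys =>
      have h : (x :: y :: ys).length - 1 = ys.length + 1 := by simp
      rw [h, List.range_succ_eq_map]
      simp only [List.map_cons, List.map_map, List.sum_cons]
      have h2 : ((List.range ys.length).map
          ((fun i => (x :: y :: ys).getD i 0 * ((x :: y :: ys).drop (i + 1)).sum) ∘ Nat.succ)).sum
          = ((List.range ((y :: ys).length - 1)).map
          (fun i => (y :: ys).getD i 0 * ((y :: ys).drop (i + 1)).sum)).sum := by
        simp only [List.length_cons, Nat.add_sub_cancel]
        refine congrArg List.sum (List.map_congr_left ?_)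
        intro i _
        simp
      rw [h2, ih]
      simp [pvF]

-- Reference value for B's single pass with running suffix total.
def pvG : List Int → Int → Int
  | [], _ => 0
  | x :: xs, tot => x * (tot - x) + pvG xs (tot - x)

theorem pv_foldl_g (gs : List (List Int)) (a tot : Int) :
    (gs.foldl
      (fun (p : Int × Int) g =>
        let remaining := p.2 - (g.length : Int)
        (p.1 + (g.length : Int) * remaining, remaining))
      (a, tot)).1 = a + pvG (gs.map (fun g => (g.length : Int))) tot := by
  induction gs generalizing a tot with
  | nil => simp [pvG]
  | cons g gs ih => simp [ih, pvG]; ring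

theorem pvG_sum_eq_f (l : List Int) : pvG l l.sum = pvF l := by
  induction l with
  | nil => rfl
  | cons x xs ih =>
    simp only [pvG, pvF, List.sum_cons, add_sub_cancel_left]
    rw [ih]

-- ===== VERDICT (by name: the statement is the Claim_ definition above) =====
theorem max_possible_negatives_spec : Claim_equal_max_possible_negatives := by
  intro groups _
  unfold Spec_max_possible_negatives max_possible_negatives max_possible_negatives_alt
  rw [pv_foldl_add_sum, pv_foldl_g, pvG_sum_eq_f]
  have h : groups.length = (groups.map (fun g => (g.length : Int))).length := by simp
  rw [h, pvA_eq_f]
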